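/- GENERATED by c/gen_decode.py: decode facts of the image, one per distinct instruction byte string. -/
import UserX.DecodeImage

#decode_all Vorbis.Dec
  "0f5705d4450100"  -- xorps xmm0,XMMWORD PTR [rip+0x145d4]
  "0f8496feffff"  -- je 11107c
  "0f8559ffffff"  -- jne 115be3
  "0f8d4b010000"  -- jge 10b551
  "0fafc5"  -- imul eax,ebp
  "0fbf4c2418"  -- movsx ecx,WORD PTR [rsp+0x18]
  "3c42"  -- cmp al,0x42
  "410fb6c6"  -- movzx eax,r14b
  "4181e4ff030000"  -- and r12d,0x3ff
  "41899e70050000"  -- mov DWORD PTR [r14+0x570],ebx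
  "418d442d00"  -- lea eax,[r13+rbp*1+0x0]
  "41d3ee"  -- shr r14d,cl
  "440fb76500"  -- movzx r12d,WORD PTR [rbp+0x0]
  "448823"  -- mov BYTE PTR [rbx],r12b
  "4489a3d0050000"  -- mov DWORD PTR [rbx+0x5d0],r12d
  "448b642460"  -- mov r12d,DWORD PTR [rsp+0x60]
  "448bbd9c000000"  -- mov r15d,DWORD PTR [rbp+0x9c]
  "45883e"  -- mov BYTE PTR [r14],r15b
  "458b7c24ec"  -- mov r15d,DWORD PTR [r12-0x14]
  "480f49c1"  -- cmovns rax,rcx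
  "4863dd"  -- movsxd rbx,ebp
  "4883c518"  -- add rbp,0x18
  "488955a8"  -- mov QWORD PTR [rbp-0x58],rdx
  "488b3424"  -- mov rsi,QWORD PTR [rsp]
  "488b8530ffffff"  -- mov rax,QWORD PTR [rbp-0xd0]
  "488d4be0"  -- lea rcx,[rbx-0x20]
  "488d7c0302"  -- lea rdi,[rbx+rax*1+0x2]
  "488dbb30080000"  -- lea rdi,[rbx+0x830]
  "488dbcebb8050000"  -- lea rdi,[rbx+rbp*8+0x5b8]
  "48c7042400000000"  -- mov QWORD PTR [rsp],0x0
  "49035e18"  -- add rbx,QWORD PTR [r14+0x18]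
  "4983ec20"  -- sub r12,0x20
  "498d3c16"  -- lea rdi,[r14+rdx*1]
  "498d85b2000000"  -- lea rax,[r13+0xb2]
  "4a8944e508"  -- mov QWORD PTR [rbp+r12*8+0x8],rax
  "4c01e3"  -- add rbx,r12
  "4c89642420"  -- mov QWORD PTR [rsp+0x20],r12
  "4c8b65b0"  -- mov r12,QWORD PTR [rbp-0x50]
  "4c8d45a0"  -- lea r8,[rbp-0x60]
  "4d63ff"  -- movsxd r15,r15d
  "4e8d2428"  -- lea r12,[rax+r13*1]
  "660f6efd"  -- movd xmm7,ebp
  "664289446302"  -- mov WORD PTR [rbx+r12*2+0x2],ax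
  "730f"  -- jae 100240
  "7466"  -- je 10c8c2
  "7599"  -- jne 114792
  "7cc1"  -- jl 109826
  "7f03"  -- jg 1161c9
  "81e7cccccccc"  -- and edi,0xcccccccc
  "83e801"  -- sub eax,0x1
  "8945b0"  -- mov DWORD PTR [rbp-0x50],eax
  "899d9c000000"  -- mov DWORD PTR [rbp+0x9c],ebx
  "8b442444"  -- mov eax,DWORD PTR [rsp+0x44]
  "8b82e8060000"  -- mov eax,DWORD PTR [rdx+0x6e8]
  "8d4f02"  -- lea ecx,[rdi+0x2]
  "be15000000"  -- mov esi,0x15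
  "c7431c00000000"  -- mov DWORD PTR [rbx+0x1c],0x0
  "c783e8060000ffffffff"  -- mov DWORD PTR [rbx+0x6e8],0xffffffff
  "e805aefeff"  -- call 100560
  "e80f19ffff"  -- call 100640
  "e818ffffff"  -- call 10c6c0
  "e822feffff"  -- call 107500
  "e82bfbffff"  -- call 108dc0
  "e83668ffff"  -- call 102380
  "e84114ffff"  -- call 1008e0
  "e84a1fffff"  -- call 100800
  "e855faffff"  -- call 101d00
  "e862f9feff"  -- call 100640
  "e86eacffff"  -- call 100640
  "e879c7feff"  -- call 100800
  "e88534ffff"  -- call 100720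
  "e88fb7feff"  -- call 1003c0
  "e89991ffff"  -- call 100800
  "e8a3adffff"  -- call 100640
  "e8ae91ffff"  -- call 10d100
  "e8b7ecfeff"  -- call 103d00
  "e8c1dbfeff"  -- call 103d00
  "e8cb89ffff"  -- call 10d1c0
  "e8d670ffff"  -- call 100640
  "e8e067ffff"  -- call 100720
  "e8e9c7feff"  -- call 1008e0
  "e8f1aafeff"  -- call 1003c0
  "e8fcadfeff"  -- call 100800
  "e933feffff"  -- jmp 111098
  "e977f6ffff"  -- jmp 113b22
  "e9d0feffff"  -- jmp 10b3f3
  "eb2f"  -- jmp 101934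
  "ebbe"  -- jmp 102a99
  "f20f102c24"  -- movsd xmm5,QWORD PTR [rsp]
  "f20f59c8"  -- mulsd xmm1,xmm0
  "f30f1033"  -- movss xmm6,DWORD PTR [rbx]
  "f30f10642410"  -- movss xmm4,DWORD PTR [rsp+0x10]
  "f30f1143f4"  -- movss DWORD PTR [rbx-0xc],xmm0
  "f30f116500"  -- movss DWORD PTR [rbp+0x0],xmm4
  "f30f58442440"  -- addss xmm0,DWORD PTR [rsp+0x40]
  "f30f596500"  -- mulss xmm4,DWORD PTR [rbp+0x0]
  "f30f5cdd"  -- subss xmm3,xmm5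
  "f3410f114424f8"  -- movss DWORD PTR [r12-0x8],xmm0
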